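-- pv_equiv track=rewrite | github.com/byeongmin-kwak/Baekjoon-Programmers | 프로그래머스/2/42626. 더 맵게/더 맵게.py | solution
-- ===== SOURCE A (Python) =====
-- import heapq
--
-- def solution(scoville, K):
--     answer = 0
--
--     heap = []
--
--     for elem in scoville:
--         heapq.heappush(heap, elem)
--
--     while heap[0] < K:
--         scoville1 = heapq.heappop(heap)
--
--         if heap:
--             scoville2 = heapq.heappop(heap)
--         else:
--             return -1
--
--         heapq.heappush(heap, scoville1+scoville2*2)
--
--         answer += 1
--
--     return answer
-- ===== SOURCE B (Python) =====
-- def solution(scoville, K):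
--     lst = sorted(scoville)
--     answer = 0
--     while lst[0] < K:
--         if len(lst) == 1:
--             return -1
--         mixed = lst[0] + 2 * lst[1]
--         rest = lst[2:]
--         i = 0
--         while i < len(rest) and rest[i] < mixed:
--             i += 1
--         rest.insert(i, mixed)
--         lst = rest
--         answer += 1
--     return answer
-- ===== Notes on version B (the rewrite author's own statement) =====
-- stated objective: alternative
-- what changed: Replaces the binary heap (heappush/heappop with sift-up/sift-down) by a plain ascending list: sort the input once, take the two head elements each round, and splice the mixed value back with a linear scan insertion.
import Mathlib
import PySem

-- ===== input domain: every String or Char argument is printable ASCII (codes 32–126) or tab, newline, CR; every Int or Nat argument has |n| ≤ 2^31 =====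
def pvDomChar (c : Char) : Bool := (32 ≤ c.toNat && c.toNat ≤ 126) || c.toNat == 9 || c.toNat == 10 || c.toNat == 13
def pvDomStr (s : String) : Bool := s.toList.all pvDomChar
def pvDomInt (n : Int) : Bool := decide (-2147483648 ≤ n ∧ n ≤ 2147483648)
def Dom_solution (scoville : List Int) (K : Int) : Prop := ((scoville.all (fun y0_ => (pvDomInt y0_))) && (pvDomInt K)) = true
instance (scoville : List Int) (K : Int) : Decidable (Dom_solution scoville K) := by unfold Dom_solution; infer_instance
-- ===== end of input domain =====

-- B replaces the binary heap by a once-sorted list with linear-scan re-insertion (objective: alternative).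
-- Equivalence is about the return value only (neither Python mutates its arguments).

-- ===== PORT A =====
-- heapq is not covered by PySem, so it is ported by hand, step for step, from CPython's
-- heapq._siftdown/_siftup/heappush/heappop; exact for Int elements (indices are always in range
-- at every read/write CPython performs, so List.set / List.getD realise the array writes/reads).
-- Each while-loop carries an explicit fuel argument that only makes it total: fuel bounds the
-- number of iterations (proved never exhausted on the calls made), it never changes a result.

-- the while-loop of _siftdown(heap, startpos, pos); newitem is the value conceptually at pos.
-- fuel ≥ pos at every call: pos strictly decreases, and at fuel 0 (then pos = 0 ≤ startpos)
-- the loop exits with the same final write heap[pos] = newitem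
def siftdownGo : Nat → List Int → Nat → Nat → Int → List Int
  | fuel + 1, heap, startpos, pos, newitem =>
    if startpos < pos then                  -- while pos > startpos
      let parentpos := (pos - 1) / 2
      let parent := heap.getD parentpos 0
      if newitem < parent then
        siftdownGo fuel (heap.set pos parent) startpos parentpos newitem
      else
        heap.set pos newitem                -- break; heap[pos] = newitem
    else
      heap.set pos newitem                  -- heap[pos] = newitem
  | 0, heap, _, pos, newitem => heap.set pos newitem

def siftdown (heap : List Int) (startpos pos : Nat) (newitem : Int) : List Int :=
  siftdownGo pos heap startpos pos newitem

-- the while-loop of _siftup (endpos = len(heap), newitem = heap[pos] at entry);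
-- childpos = 2*pos+1 is recomputed in the loop guard.  fuel ≥ endpos - pos at every call:
-- pos strictly increases below endpos, and at fuel 0 (then endpos ≤ pos) the guard is false
-- and the loop exits into the same final heap[pos] = newitem; _siftdown(heap, startpos, pos)
def siftupLoopGo : Nat → List Int → Nat → Nat → Nat → Int → List Int
  | fuel + 1, heap, endpos, startpos, pos, newitem =>
    if 2 * pos + 1 < endpos then            -- while childpos < endpos
      let childpos := 2 * pos + 1
      let rightpos := childpos + 1
      let childpos2 := if rightpos < endpos ∧ ¬ (heap.getD childpos 0 < heap.getD rightpos 0)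
                       then rightpos else childpos
      siftupLoopGo fuel (heap.set pos (heap.getD childpos2 0)) endpos startpos childpos2 newitem
    else
      siftdown (heap.set pos newitem) startpos pos newitem
  | 0, heap, _, startpos, pos, newitem => siftdown (heap.set pos newitem) startpos pos newitem

-- _siftup(heap, pos)
def siftup (heap : List Int) (pos : Nat) : List Int :=
  let endpos := heap.length
  let startpos := pos
  let newitem := heap.getD pos 0
  siftupLoopGo (endpos - pos) heap endpos startpos pos newitem

-- heapq.heappush
def heappush (heap : List Int) (item : Int) : List Int :=
  siftdown (heap ++ [item]) 0 heap.length item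

-- heapq.heappop; Python raises IndexError on an empty heap, which Pre_solution excludes
-- (the [] branch below is unreachable under Pre_solution)
def heappop (heap : List Int) : Int × List Int :=
  match heap.dropLast with                -- lastelt = heap.pop(); rest is the remaining list
  | [] => (heap.getLast?.getD 0, [])
  | r :: rs => (r, siftup ((r :: rs).set 0 (heap.getLast?.getD 0)) 0)

-- the while-loop of A; fuel ≥ len(heap) at every call (the heap shrinks by one per iteration),
-- so fuel 0 is reached only with heap = [], Python's IndexError, unreachable under Pre_solution
-- (as is the explicit [] case)
def loopAGo : Nat → List Int → Int → Int → Int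
  | _ + 1, [], _, _ => 0
  | fuel + 1, r :: t, K, answer =>
    if r < K then                          -- while heap[0] < K
      let p1 := heappop (r :: t)           -- scoville1 = heappop(heap)
      match p1.2 with
      | [] => -1                           -- if not heap: return -1
      | _ :: _ =>
        let p2 := heappop p1.2             -- scoville2 = heappop(heap)
        loopAGo fuel (heappush p2.2 (p1.1 + p2.1 * 2)) K (answer + 1)
    else answer
  | 0, _, _, _ => 0

def loopA (heap : List Int) (K answer : Int) : Int :=
  loopAGo heap.length heap K answer

def solution (scoville : List Int) (K : Int) : Int :=
  let heap := scoville.foldl (fun heap elem => heappush heap elem) ([] : List Int)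
  loopA heap K 0

-- ===== PORT B =====
-- the inner scan-insert loop of B (index loop ported as structural recursion)
def insortScan (mixed : Int) : List Int → List Int
  | [] => [mixed]
  | x :: t => if x < mixed then x :: insortScan mixed t else mixed :: x :: t

-- the while-loop of B; fuel ≥ len(lst) at every call (the list shrinks by one per iteration),
-- so fuel 0 is reached only with lst = [], Python's IndexError, unreachable under Pre_solution
def loopBGo : Nat → List Int → Int → Int → Int
  | _ + 1, [], _, _ => 0
  | _ + 1, [x], K, answer => if x < K then -1 else answer
  | fuel + 1, x :: y :: t, K, answer =>
    if x < K then loopBGo fuel (insortScan (x + 2 * y) t) K (answer + 1) else answer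
  | 0, _, _, _ => 0

def loopB (lst : List Int) (K answer : Int) : Int :=
  loopBGo lst.length lst K answer

def solution_alt (scoville : List Int) (K : Int) : Int :=
  loopB (PySem.List.sorted scoville (fun v => v) false) K 0

-- ===== PRECONDITION & SPEC =====
-- Pre_ excludes only the empty list, on which the Python A raises IndexError (heap[0]).
def Pre_solution (scoville : List Int) (K : Int) : Prop := scoville ≠ []
instance (scoville : List Int) (K : Int) : Decidable (Pre_solution scoville K) := by unfold Pre_solution; infer_instance

def pvWitness_solution : List Int × Int := ([1, 2, 3, 9, 10, 12], 7)

def Spec_solution (scoville : List Int) (K : Int) (out : Int) : Prop := out = solution_alt scoville K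
instance (scoville : List Int) (K : Int) (out : Int) : Decidable (Spec_solution scoville K out) := by unfold Spec_solution; infer_instance

-- ===== CLAIM (what is proved, stated in full; the proofs are below) =====
def Claim_equal_solution : Prop := ∀ (scoville : List Int) (K : Int), Dom_solution scoville K → Pre_solution scoville K → Spec_solution scoville K (solution scoville K)

-- ===== LEMMAS AND PROOFS =====

-- the binary-heap invariant: every non-root entry is ≥ its parent
def heapInv (h : List Int) : Prop :=
  ∀ j : Nat, 0 < j → j < h.length → h.getD ((j - 1) / 2) 0 ≤ h.getD j 0

-- invariant of _siftdown: the array is a heap except that position p is a hole whose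
-- intended content is x: all edges avoiding p hold; for every child j of p, x ≤ h[j]
-- and (if p is not the root) h[parent p] ≤ h[j]
def HoleInv (h : List Int) (p : Nat) (x : Int) : Prop :=
  (∀ j : Nat, 0 < j → j < h.length → j ≠ p → (j - 1) / 2 ≠ p →
     h.getD ((j - 1) / 2) 0 ≤ h.getD j 0) ∧
  (∀ j : Nat, 0 < j → j < h.length → (j - 1) / 2 = p →
     x ≤ h.getD j 0 ∧ (0 < p → h.getD ((p - 1) / 2) 0 ≤ h.getD j 0))

-- invariant of the _siftup descent: hole at p, edges avoiding p hold, and every child of p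
-- is ≥ p's parent (when p is not the root)
def DownInv (h : List Int) (p : Nat) : Prop :=
  (∀ j : Nat, 0 < j → j < h.length → j ≠ p → (j - 1) / 2 ≠ p →
     h.getD ((j - 1) / 2) 0 ≤ h.getD j 0) ∧
  (∀ j : Nat, 0 < j → j < h.length → (j - 1) / 2 = p → 0 < p →
     h.getD ((p - 1) / 2) 0 ≤ h.getD j 0)

theorem getD_set (l : List Int) (i : Nat) (a : Int) (j : Nat) :
    (l.set i a).getD j 0 = if j = i ∧ i < l.length then a else l.getD j 0 := by
  simp [List.getD, List.getElem?_set]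
  split_ifs with h1 h2 h3 <;> simp_all

theorem set_getD_self (l : List Int) (i : Nat) (h : i < l.length) :
    l.set i (l.getD i 0) = l := by
  simp [List.getD, List.getElem?_eq_getElem h]

theorem set_cons_swap (t : List Int) (i : Nat) (a b : Int) (hi : i < t.length) :
    (a :: t.set i b).Perm (b :: t.set i a) := by
  induction t generalizing i with
  | nil => simp at hi
  | cons x t ih =>
    cases i with
    | zero => simpa using List.Perm.swap b a t
    | succ i =>
      simp only [List.set_cons_succ]
      exact ((List.Perm.swap x a _).trans
        (List.Perm.cons x (ih i (by simpa using hi)))).trans (List.Perm.swap b x _)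

theorem set_swap_perm (l : List Int) (p q : Nat) (a b : Int)
    (hp : p < l.length) (hq : q < l.length) (hne : p ≠ q) :
    ((l.set p a).set q b).Perm ((l.set p b).set q a) := by
  induction l generalizing p q with
  | nil => simp at hp
  | cons x t ih =>
    cases p with
    | zero =>
      cases q with
      | zero => exact absurd rfl hne
      | succ q => simpa using set_cons_swap t q a b (by simpa using hq)
    | succ p =>
      cases q with
      | zero => simpa using (set_cons_swap t p a b (by simpa using hp)).symm
      | succ q =>
        simp only [List.set_cons_succ]
        exact List.Perm.cons x (ih p q (by simpa using hp) (by simpa using hq) (by omega))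

theorem siftdownGo_length (fuel : Nat) : ∀ (heap : List Int) (s p : Nat) (x : Int),
    (siftdownGo fuel heap s p x).length = heap.length := by
  induction fuel with
  | zero => intro heap s p x; exact List.length_set ..
  | succ f ih =>
    intro heap s p x
    show (if s < p then
        if x < heap.getD ((p - 1) / 2) 0
        then siftdownGo f (heap.set p (heap.getD ((p - 1) / 2) 0)) s ((p - 1) / 2) x
        else heap.set p x
      else heap.set p x).length = heap.length
    split
    · split
      · rw [ih, List.length_set]
      · exact List.length_set ..
    · exact List.length_set ..

theorem siftdown_length (heap : List Int) (s p : Nat) (x : Int) :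
    (siftdown heap s p x).length = heap.length :=
  siftdownGo_length p heap s p x

theorem siftupLoopGo_length (fuel : Nat) : ∀ (heap : List Int) (e s p : Nat) (x : Int),
    (siftupLoopGo fuel heap e s p x).length = heap.length := by
  induction fuel with
  | zero => intro heap e s p x; rw [siftupLoopGo, siftdown_length, List.length_set]
  | succ f ih =>
    intro heap e s p x
    show (if 2 * p + 1 < e then
        siftupLoopGo f (heap.set p (heap.getD (if 2 * p + 1 + 1 < e ∧
            ¬ heap.getD (2 * p + 1) 0 < heap.getD (2 * p + 1 + 1) 0
            then 2 * p + 1 + 1 else 2 * p + 1) 0)) e s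
          (if 2 * p + 1 + 1 < e ∧ ¬ heap.getD (2 * p + 1) 0 < heap.getD (2 * p + 1 + 1) 0
            then 2 * p + 1 + 1 else 2 * p + 1) x
      else siftdown (heap.set p x) s p x).length = heap.length
    split
    · rw [ih, List.length_set]
    · rw [siftdown_length, List.length_set]

theorem siftup_length (heap : List Int) (p : Nat) :
    (siftup heap p).length = heap.length :=
  siftupLoopGo_length (heap.length - p) heap heap.length p p (heap.getD p 0)

theorem heappush_length (heap : List Int) (x : Int) :
    (heappush heap x).length = heap.length + 1 := by
  unfold heappush
  rw [siftdown_length, List.length_append, List.length_singleton]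

theorem heappop_length (heap : List Int) :
    (heappop heap).2.length = heap.length - 1 := by
  have hl : heap.dropLast.length = heap.length - 1 := List.length_dropLast
  unfold heappop
  split <;> rename_i hh <;> rw [hh] at hl
  · exact hl
  · rw [siftup_length, List.length_set]
    exact hl

theorem siftdownGo_perm (fuel : Nat) : ∀ (heap : List Int) (s p : Nat) (x : Int),
    p < heap.length → (siftdownGo fuel heap s p x).Perm (heap.set p x) := by
  induction fuel with
  | zero => intro heap s p x _; exact List.Perm.refl _
  | succ f ih =>
    intro heap s p x hp
    show (if s < p then
        if x < heap.getD ((p - 1) / 2) 0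
        then siftdownGo f (heap.set p (heap.getD ((p - 1) / 2) 0)) s ((p - 1) / 2) x
        else heap.set p x
      else heap.set p x).Perm (heap.set p x)
    split
    · split
      · rename_i h h2
        have hpplt : (p - 1) / 2 < heap.length := by omega
        refine ((ih _ s _ x (by rw [List.length_set]; omega)).trans
          (set_swap_perm heap p ((p - 1) / 2) (heap.getD ((p - 1) / 2) 0) x hp hpplt
            (by omega))).trans ?_
        have hx : heap.getD ((p - 1) / 2) 0 = (heap.set p x).getD ((p - 1) / 2) 0 := by
          rw [getD_set, if_neg]; rintro ⟨hc, -⟩; omega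
        rw [hx, set_getD_self _ _ (by rw [List.length_set]; omega)]
      · exact List.Perm.refl _
    · exact List.Perm.refl _

theorem siftdown_perm (heap : List Int) (s p : Nat) (x : Int) (hp : p < heap.length) :
    (siftdown heap s p x).Perm (heap.set p x) :=
  siftdownGo_perm p heap s p x hp

theorem siftup_exit_perm (heap : List Int) (s p : Nat) (x : Int) (hp : p < heap.length) :
    (siftdown (heap.set p x) s p x).Perm (heap.set p x) := by
  have := siftdown_perm (heap.set p x) s p x (by rw [List.length_set]; exact hp)
  rwa [List.set_set] at this

theorem siftupLoopGo_perm (fuel : Nat) : ∀ (heap : List Int) (e s p : Nat) (x : Int),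
    e = heap.length → p < heap.length → (siftupLoopGo fuel heap e s p x).Perm (heap.set p x) := by
  induction fuel with
  | zero =>
    intro heap e s p x he hp
    rw [siftupLoopGo]
    exact siftup_exit_perm heap s p x hp
  | succ f ih =>
    intro heap e s p x he hp
    show (if 2 * p + 1 < e then
        siftupLoopGo f (heap.set p (heap.getD (if 2 * p + 1 + 1 < e ∧
            ¬ heap.getD (2 * p + 1) 0 < heap.getD (2 * p + 1 + 1) 0
            then 2 * p + 1 + 1 else 2 * p + 1) 0)) e s
          (if 2 * p + 1 + 1 < e ∧ ¬ heap.getD (2 * p + 1) 0 < heap.getD (2 * p + 1 + 1) 0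
            then 2 * p + 1 + 1 else 2 * p + 1) x
      else siftdown (heap.set p x) s p x).Perm (heap.set p x)
    split
    · rename_i h
      generalize hC : (if 2 * p + 1 + 1 < e ∧
          ¬ heap.getD (2 * p + 1) 0 < heap.getD (2 * p + 1 + 1) 0
          then 2 * p + 1 + 1 else 2 * p + 1) = C
      have hc2 : p < C ∧ C < e := by rw [← hC]; split <;> omega
      have hClt : C < heap.length := by omega
      refine ((ih _ e s C x (by rw [List.length_set]; exact he)
          (by rw [List.length_set]; exact hClt)).trans
        (set_swap_perm heap p C (heap.getD C 0) x hp hClt (by omega))).trans ?_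
      have hx : heap.getD C 0 = (heap.set p x).getD C 0 := by
        rw [getD_set, if_neg]; rintro ⟨hc, -⟩; omega
      rw [hx, set_getD_self _ _ (by rw [List.length_set]; exact hClt)]
    · exact siftup_exit_perm heap s p x hp

theorem heappush_perm (heap : List Int) (x : Int) :
    (heappush heap x).Perm (heap ++ [x]) := by
  unfold heappush
  have h0 : (heap ++ [x]).getD heap.length 0 = x := by
    simp [List.getD]
  have hset := set_getD_self (heap ++ [x]) heap.length (by simp)
  rw [h0] at hset
  have := siftdown_perm (heap ++ [x]) 0 heap.length x (by simp)
  rwa [hset] at this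

-- the final write heap[pos] = newitem of _siftdown: with the hole invariant and the parent
-- bound at the exit, the array is a heap again
theorem holeInv_write (heap : List Int) (p : Nat) (x : Int) (hp : p < heap.length)
    (hinv : HoleInv heap p x) (hpar : 0 < p → heap.getD ((p - 1) / 2) 0 ≤ x) :
    heapInv (heap.set p x) := by
  obtain ⟨A1, A2⟩ := hinv
  intro j hj hjlen
  rw [List.length_set] at hjlen
  rw [getD_set, getD_set]
  by_cases hjp : j = p
  · rw [if_neg (by rintro ⟨hc, -⟩; omega), if_pos ⟨hjp, hp⟩, hjp]
    exact hpar (by omega)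
  · by_cases hpj : (j - 1) / 2 = p
    · rw [if_pos ⟨hpj, hp⟩, if_neg (fun hc => hjp hc.1)]
      exact (A2 j hj hjlen hpj).1
    · rw [if_neg (fun hc => hpj hc.1), if_neg (fun hc => hjp hc.1)]
      exact A1 j hj hjlen hjp hpj

theorem siftdownGo_heapInv (fuel : Nat) : ∀ (heap : List Int) (p : Nat) (x : Int),
    p ≤ fuel → p < heap.length → HoleInv heap p x → heapInv (siftdownGo fuel heap 0 p x) := by
  induction fuel with
  | zero =>
    intro heap p x hf hp hinv
    exact holeInv_write heap p x hp hinv (fun hpos => absurd hpos (by omega))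
  | succ f ih =>
    intro heap p x hf hp hinv
    show heapInv (if 0 < p then
        if x < heap.getD ((p - 1) / 2) 0
        then siftdownGo f (heap.set p (heap.getD ((p - 1) / 2) 0)) 0 ((p - 1) / 2) x
        else heap.set p x
      else heap.set p x)
    split
    · rename_i hpos
      obtain ⟨A1, A2⟩ := hinv
      have hpplt : (p - 1) / 2 < heap.length := by omega
      split
      · rename_i h2
        refine ih _ _ x (by omega) (by rw [List.length_set]; omega) ⟨?_, ?_⟩
        · -- edges avoiding the new hole (p-1)/2
          intro j hj hjlen hjne hpne
          rw [List.length_set] at hjlen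
          rw [getD_set, getD_set]
          by_cases hjp : j = p
          · exact absurd (by omega) hpne
          · by_cases hpj : (j - 1) / 2 = p
            · rw [if_pos ⟨hpj, hp⟩, if_neg (fun hc => hjp hc.1)]
              exact (A2 j hj hjlen hpj).2 hpos
            · rw [if_neg (fun hc => hpj hc.1), if_neg (fun hc => hjp hc.1)]
              exact A1 j hj hjlen hjp hpj
        · -- children of the new hole (p-1)/2
          intro j hj hjlen hpj
          rw [List.length_set] at hjlen
          constructor
          · rw [getD_set]
            by_cases hjp : j = p
            · rw [if_pos ⟨hjp, hp⟩]; exact le_of_lt h2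
            · rw [if_neg (fun hc => hjp hc.1)]
              refine le_trans (le_of_lt h2) ?_
              have := A1 j hj hjlen hjp (by omega)
              rw [hpj] at this
              exact this
          · intro hQ0
            rw [getD_set, getD_set]
            rw [if_neg (by rintro ⟨hc, -⟩; omega)]
            have hA1Q : heap.getD (((p - 1) / 2 - 1) / 2) 0 ≤ heap.getD ((p - 1) / 2) 0 :=
              A1 ((p - 1) / 2) hQ0 hpplt (by omega) (by omega)
            by_cases hjp : j = p
            · rw [if_pos ⟨hjp, hp⟩]
              exact hA1Q
            · rw [if_neg (fun hc => hjp hc.1)]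
              refine le_trans hA1Q ?_
              have := A1 j hj hjlen hjp (by omega)
              rw [hpj] at this
              exact this
      · rename_i h2
        exact holeInv_write heap p x hp ⟨A1, A2⟩ (fun _ => not_lt.mp h2)
    · rename_i hpos
      exact holeInv_write heap p x hp hinv (fun hc => absurd hc hpos)

theorem siftdown_heapInv (heap : List Int) (p : Nat) (x : Int)
    (hp : p < heap.length) (hinv : HoleInv heap p x) :
    heapInv (siftdown heap 0 p x) :=
  siftdownGo_heapInv p heap p x (le_refl p) hp hinv

-- the exit of the _siftup descent: pos is a leaf, the hole invariant holds, and the trailing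
-- _siftdown restores the heap
theorem siftup_exit_heapInv (heap : List Int) (p : Nat) (x : Int) (hp : p < heap.length)
    (hinv : DownInv heap p) (hleaf : heap.length ≤ 2 * p + 1) :
    heapInv (siftdown (heap.set p x) 0 p x) := by
  obtain ⟨A1, A2⟩ := hinv
  refine siftdown_heapInv _ _ _ (by rw [List.length_set]; exact hp) ⟨?_, ?_⟩
  · intro j hj hjlen hjne hpne
    rw [List.length_set] at hjlen
    rw [getD_set, getD_set, if_neg (fun hc => hpne hc.1), if_neg (fun hc => hjne hc.1)]
    exact A1 j hj hjlen hjne hpne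
  · intro j hj hjlen hpj
    rw [List.length_set] at hjlen
    exact absurd hjlen (by omega)

theorem siftupLoopGo_heapInv (fuel : Nat) : ∀ (heap : List Int) (e p : Nat) (x : Int),
    e = heap.length → e - p ≤ fuel → p < heap.length → DownInv heap p →
    heapInv (siftupLoopGo fuel heap e 0 p x) := by
  induction fuel with
  | zero =>
    intro heap e p x he hf hp hinv
    rw [siftupLoopGo]
    exact siftup_exit_heapInv heap p x hp hinv (by omega)
  | succ f ih =>
    intro heap e p x he hf hp hinv
    obtain ⟨A1, A2⟩ := hinv
    show heapInv (if 2 * p + 1 < e then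
        siftupLoopGo f (heap.set p (heap.getD (if 2 * p + 1 + 1 < e ∧
            ¬ heap.getD (2 * p + 1) 0 < heap.getD (2 * p + 1 + 1) 0
            then 2 * p + 1 + 1 else 2 * p + 1) 0)) e 0
          (if 2 * p + 1 + 1 < e ∧ ¬ heap.getD (2 * p + 1) 0 < heap.getD (2 * p + 1 + 1) 0
            then 2 * p + 1 + 1 else 2 * p + 1) x
      else siftdown (heap.set p x) 0 p x)
    split
    · rename_i h
      generalize hC : (if 2 * p + 1 + 1 < e ∧
          ¬ heap.getD (2 * p + 1) 0 < heap.getD (2 * p + 1 + 1) 0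
          then 2 * p + 1 + 1 else 2 * p + 1) = C
      have hc2 : p < C ∧ C < e ∧ (C - 1) / 2 = p := by rw [← hC]; split <;> omega
      have hClt : C < heap.length := by omega
      -- the chosen child is minimal among the children of p
      have hmin : ∀ j : Nat, 0 < j → j < heap.length → (j - 1) / 2 = p → j ≠ C →
          heap.getD C 0 ≤ heap.getD j 0 := by
        intro j hj hjlen hpj hjne
        by_cases hcase : 2 * p + 1 + 1 < e ∧
            ¬ heap.getD (2 * p + 1) 0 < heap.getD (2 * p + 1 + 1) 0
        · have hcval : C = 2 * p + 1 + 1 := by rw [← hC, if_pos hcase]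
          have hjcp : j = 2 * p + 1 := by omega
          rw [hcval, hjcp]
          exact not_lt.mp hcase.2
        · have hcval : C = 2 * p + 1 := by rw [← hC, if_neg hcase]
          have hjrp : j = 2 * p + 1 + 1 := by omega
          rcases not_and_or.mp hcase with hbad | hlt
          · exact absurd (by omega) hbad
          · rw [hcval, hjrp]
            exact le_of_lt (not_not.mp hlt)
      refine ih _ e C x (by rw [List.length_set]; exact he) (by omega)
        (by rw [List.length_set]; exact hClt) ⟨?_, ?_⟩
      · intro j hj hjlen hjne hpne
        rw [List.length_set] at hjlen
        rw [getD_set, getD_set]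
        by_cases hjp : j = p
        · rw [if_neg (by rintro ⟨hc, -⟩; omega), if_pos ⟨hjp, hp⟩]
          have hposgt : 0 < p := by omega
          have hA2 := A2 C (by omega) hClt (by omega) hposgt
          calc heap.getD ((j - 1) / 2) 0 = heap.getD ((p - 1) / 2) 0 := by rw [hjp]
            _ ≤ heap.getD C 0 := hA2
        · by_cases hpj : (j - 1) / 2 = p
          · rw [if_pos ⟨hpj, hp⟩, if_neg (fun hc => hjp hc.1)]
            exact hmin j hj hjlen hpj hjne
          · rw [if_neg (fun hc => hpj hc.1), if_neg (fun hc => hjp hc.1)]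
            exact A1 j hj hjlen hjp hpj
      · intro j hj hjlen hpj hc2pos
        rw [List.length_set] at hjlen
        rw [getD_set, getD_set]
        rw [hc2.2.2, if_pos ⟨rfl, hp⟩, if_neg (by rintro ⟨hc, -⟩; omega)]
        have := A1 j hj hjlen (by omega) (by omega)
        rw [hpj] at this
        exact this
    · rename_i h
      exact siftup_exit_heapInv heap p x hp ⟨A1, A2⟩ (by omega)

theorem getD_append_lt (l : List Int) (x : Int) (j : Nat) (h : j < l.length) :
    (l ++ [x]).getD j 0 = l.getD j 0 := by
  simp [List.getD, List.getElem?_append_left h]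

theorem heappush_heapInv (heap : List Int) (x : Int) (hinv : heapInv heap) :
    heapInv (heappush heap x) := by
  unfold heappush
  refine siftdown_heapInv _ _ _ (by simp) ⟨?_, ?_⟩
  · intro j hj hjlen hjne hpne
    rw [List.length_append, List.length_singleton] at hjlen
    have hjlt : j < heap.length := by omega
    have hplt : (j - 1) / 2 < heap.length := by omega
    rw [getD_append_lt _ _ _ hjlt, getD_append_lt _ _ _ hplt]
    exact hinv j hj hjlt
  · intro j hj hjlen hpj
    rw [List.length_append, List.length_singleton] at hjlen
    exact absurd hjlen (by omega)

theorem heappop_fst (heap : List Int) (hne : heap ≠ []) :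
    (heappop heap).1 = heap.getD 0 0 := by
  unfold heappop
  split
  · rename_i hh
    cases heap with
    | nil => exact absurd rfl hne
    | cons a t =>
      cases t with
      | nil => simp
      | cons b u => simp [List.dropLast_cons_of_ne_nil] at hh
  · rename_i r rs hh
    have h0 : heap.dropLast.getD 0 0 = heap.getD 0 0 := by
      simp only [List.getD, List.getElem?_dropLast]
      rw [if_pos]
      have := congrArg List.length hh
      simp at this
      omega
    rw [hh] at h0
    simpa using h0

theorem siftup_zero_perm (l : List Int) (hl : l ≠ []) : (siftup l 0).Perm l := by
  unfold siftup
  have hlen : 0 < l.length := List.length_pos_iff.mpr hl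
  have := siftupLoopGo_perm (l.length - 0) l l.length 0 0 (l.getD 0 0) rfl hlen
  rwa [set_getD_self _ _ hlen] at this

theorem cons_getLast? (a : Int) (t : List Int) (ht : t ≠ []) :
    t = t.dropLast ++ [(a :: t).getLast?.getD 0] := by
  obtain ⟨u, y, rfl⟩ := (List.eq_nil_or_concat t).resolve_left ht
  simp only [List.concat_eq_append]
  rw [← List.cons_append, List.getLast?_concat]
  simp

theorem heappop_perm (a : Int) (t : List Int) :
    (heappop (a :: t)).2.Perm t := by
  by_cases ht : t = []
  · subst ht
    unfold heappop
    simp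
  · have hdrop : (a :: t).dropLast = a :: t.dropLast := List.dropLast_cons_of_ne_nil ht
    have hdec := cons_getLast? a t ht
    unfold heappop
    split
    · rename_i hh
      rw [hdrop] at hh
      simp at hh
    · rename_i r rs' hh
      rw [hdrop] at hh
      obtain ⟨rfl, rfl⟩ : a = r ∧ t.dropLast = rs' := by simpa using hh
      rw [show (a :: t.dropLast).set 0 ((a :: t).getLast?.getD 0)
          = (a :: t).getLast?.getD 0 :: t.dropLast by simp]
      refine (siftup_zero_perm _ (by simp)).trans ?_
      conv_rhs => rw [hdec]
      exact (List.perm_append_singleton _ t.dropLast).symm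

theorem heappop_heapInv (heap : List Int) (hinv : heapInv heap) :
    heapInv (heappop heap).2 := by
  unfold heappop
  split
  · intro j hj hjlen; simp at hjlen
  · rename_i r rs hh
    have h1 : heap.dropLast.length = heap.length - 1 := by simp
    rw [hh] at h1
    unfold siftup
    refine siftupLoopGo_heapInv _ _ _ _ _ (by simp) (le_refl _) (by simp) ⟨?_, ?_⟩
    · intro j hj hjlen hjne hpne
      rw [List.length_set] at hjlen
      rw [getD_set, getD_set, if_neg (fun hc => hpne hc.1), if_neg (fun hc => hjne hc.1)]
      have hget : ∀ k : Nat, k < (r :: rs).length → (r :: rs).getD k 0 = heap.getD k 0 := by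
        intro k hk
        rw [← hh]
        simp only [List.getD, List.getElem?_dropLast]
        rw [if_pos (by omega : k < heap.length - 1)]
      rw [hget j hjlen, hget ((j - 1) / 2) (by omega)]
      exact hinv j hj (by omega)
    · intro j hj hjlen hpj hpos
      exact absurd hpos (by omega)

theorem heapInv_root_min (h : List Int) (hinv : heapInv h) :
    ∀ j : Nat, j < h.length → h.getD 0 0 ≤ h.getD j 0 := by
  intro j
  induction j using Nat.strong_induction_on with
  | _ j ih =>
    intro hj
    rcases Nat.eq_zero_or_pos j with hz | hpos
    · subst hz; exact le_refl _
    · exact le_trans (ih ((j - 1) / 2) (by omega) (by omega)) (hinv j hpos hj)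

theorem heapInv_root_min_mem (h : List Int) (hinv : heapInv h) (y : Int) (hy : y ∈ h) :
    h.getD 0 0 ≤ y := by
  obtain ⟨k, hk, rfl⟩ := List.mem_iff_getElem.1 hy
  rw [← List.getD_eq_getElem h 0 hk]
  exact heapInv_root_min h hinv k hk

theorem insortScan_perm (m : Int) (t : List Int) :
    (insortScan m t).Perm (m :: t) := by
  induction t with
  | nil => simp [insortScan]
  | cons x t ih =>
    unfold insortScan
    split
    · exact (List.Perm.cons x ih).trans (List.Perm.swap m x t)
    · exact List.Perm.refl _

theorem insortScan_sorted (m : Int) (t : List Int) (h : t.Pairwise (· ≤ ·)) :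
    (insortScan m t).Pairwise (· ≤ ·) := by
  induction t with
  | nil => simp [insortScan]
  | cons x t ih =>
    obtain ⟨hx, ht⟩ := List.pairwise_cons.1 h
    unfold insortScan
    split
    · rename_i hlt
      refine List.pairwise_cons.2 ⟨?_, ih ht⟩
      intro y hy
      rcases List.mem_cons.1 ((insortScan_perm m t).mem_iff.1 hy) with rfl | hyt
      · exact le_of_lt hlt
      · exact hx y hyt
    · rename_i hge
      refine List.pairwise_cons.2 ⟨?_, h⟩
      intro y hy
      rcases List.mem_cons.1 hy with rfl | hyt
      · exact not_lt.mp hge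
      · exact le_trans (not_lt.mp hge) (hx y hyt)

theorem build_heap (xs : List Int) (h : List Int) (hinv : heapInv h) :
    heapInv (xs.foldl (fun heap elem => heappush heap elem) h) ∧
    (xs.foldl (fun heap elem => heappush heap elem) h).Perm (h ++ xs) := by
  induction xs generalizing h with
  | nil => exact ⟨hinv, by simp⟩
  | cons x xs ih =>
    simp only [List.foldl_cons]
    obtain ⟨i1, p1⟩ := ih (heappush h x) (heappush_heapInv h x hinv)
    refine ⟨i1, p1.trans ?_⟩
    refine (( (heappush_perm h x).append_right xs).trans ?_)
    rw [List.append_assoc]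
    simp

theorem sorted_head_min (x : Int) (l : List Int) (hs : (x :: l).Pairwise (· ≤ ·))
    (y : Int) (hy : y ∈ x :: l) : x ≤ y := by
  rcases List.mem_cons.1 hy with rfl | hyl
  · exact le_refl y
  · exact (List.pairwise_cons.1 hs).1 y hyl

theorem root_eq_sorted_head (h : List Int) (x : Int) (l : List Int)
    (hinv : heapInv h) (hperm : h.Perm (x :: l)) (hs : (x :: l).Pairwise (· ≤ ·)) :
    h.getD 0 0 = x := by
  have hne : h ≠ [] := by
    intro hc; rw [hc] at hperm; exact absurd hperm.symm.eq_nil (by simp)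
  have h1 : h.getD 0 0 ≤ x :=
    heapInv_root_min_mem h hinv x (hperm.mem_iff.2 (List.mem_cons_self))
  have h2 : x ≤ h.getD 0 0 := by
    refine sorted_head_min x l hs _ (hperm.mem_iff.1 ?_)
    cases h with
    | nil => exact absurd rfl hne
    | cons a t => simp
  omega

theorem loop_eq (fuel : Nat) : ∀ (h l : List Int) (K ans : Int),
    h.length ≤ fuel → h ≠ [] → heapInv h → h.Perm l → l.Pairwise (· ≤ ·) →
    loopAGo fuel h K ans = loopBGo fuel l K ans := by
  induction fuel with
  | zero =>
    intro h l K ans hlen hne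
    cases h with
    | nil => exact absurd rfl hne
    | cons r t => simp at hlen
  | succ f ih =>
    intro h l K ans hlen hne hinv hperm hsort
    obtain ⟨r, t, rfl⟩ : ∃ r t, h = r :: t := by
      cases h with
      | nil => exact absurd rfl hne
      | cons r t => exact ⟨r, t, rfl⟩
    obtain ⟨x, lt', rfl⟩ : ∃ x lt', l = x :: lt' := by
      cases l with
      | nil => exact absurd hperm.eq_nil (by simp)
      | cons x lt' => exact ⟨x, lt', rfl⟩
    have hrx : r = x := by
      have := root_eq_sorted_head (r :: t) x lt' hinv hperm hsort
      simpa using this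
    subst hrx
    by_cases hK : r < K
    · rw [loopAGo]
      simp only [if_pos hK]
      split
      · -- A pops the only element and returns -1
        rename_i heq
        have hlen1 : t.length = 0 := by
          have := heappop_length (r :: t)
          rw [heq] at this
          simpa using this.symm
        obtain rfl : t = [] := List.eq_nil_of_length_eq_zero hlen1
        obtain rfl : lt' = [] := by
          have := hperm.length_eq
          simpa using (List.eq_nil_of_length_eq_zero (by simpa using this.symm))
        rw [loopBGo, if_pos hK]
      · -- A pops two elements and pushes the mix
        rename_i q u heq
        have hfst : (heappop (r :: t)).1 = r := by
          have := heappop_fst (r :: t) (by simp)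
          simpa using this
        have h1inv : heapInv (q :: u) := by
          have := heappop_heapInv (r :: t) hinv
          rwa [heq] at this
        have h1perm : (q :: u).Perm t := by
          have := heappop_perm r t
          rwa [heq] at this
        have htl : t.Perm lt' := hperm.cons_inv
        obtain ⟨y, t2, rfl⟩ : ∃ y t2, lt' = y :: t2 := by
          cases lt' with
          | nil =>
            exfalso
            have := (h1perm.trans htl).eq_nil
            simp at this
          | cons y t2 => exact ⟨y, t2, rfl⟩
        have hsort2 : (y :: t2).Pairwise (· ≤ ·) := (List.pairwise_cons.1 hsort).2
        have hqy : q = y := by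
          have := root_eq_sorted_head (q :: u) y t2 h1inv (h1perm.trans htl) hsort2
          simpa using this
        subst hqy
        have h2fst : (heappop (q :: u)).1 = q := by
          have := heappop_fst (q :: u) (by simp)
          simpa using this
        have h2perm : (heappop (q :: u)).2.Perm t2 :=
          (heappop_perm q u).trans ((h1perm.trans htl).cons_inv)
        have h2inv : heapInv (heappop (q :: u)).2 := heappop_heapInv (q :: u) h1inv
        have hpushperm : (heappush (heappop (q :: u)).2 (r + q * 2)).Perm
            (insortScan (r + 2 * q) t2) := by
          refine (heappush_perm _ _).trans ?_
          refine (List.perm_append_singleton _ _).trans ?_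
          have : (r + q * 2) = (r + 2 * q) := by ring
          rw [this]
          exact (List.Perm.cons _ h2perm).trans (insortScan_perm (r + 2 * q) t2).symm
        have hlen2 : (heappush (heappop (q :: u)).2 (r + q * 2)).length ≤ f := by
          rw [heappush_length, heappop_length]
          have h3 := heappop_length (r :: t)
          rw [heq] at h3
          simp at h3 hlen ⊢
          omega
        rw [hfst, heq, h2fst]
        rw [ih _ (insortScan (r + 2 * q) t2) K (ans + 1) hlen2
          (List.ne_nil_of_length_pos (by rw [heappush_length]; omega))
          (heappush_heapInv _ _ h2inv) hpushperm
          (insortScan_sorted _ _ (List.pairwise_cons.1 hsort2).2)]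
        rw [loopBGo, if_pos hK]
    · rw [loopAGo]
      simp only [if_neg hK]
      cases lt' with
      | nil => rw [loopBGo, if_neg hK]
      | cons y t2 => rw [loopBGo, if_neg hK]

-- ===== VERDICT (by name: the statement is the Claim_ definition above) =====
theorem solution_spec : Claim_equal_solution := by
  intro scoville K _ hpre
  unfold Spec_solution solution solution_alt loopA loopB
  obtain ⟨hinv, hperm⟩ := build_heap scoville [] (by intro j hj hj2; simp at hj2)
  simp only [List.nil_append] at hperm
  have hsp : (PySem.List.sorted scoville (fun v => v) false).Perm scoville :=
    PySem.List.sorted_perm ..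
  have hlen : (PySem.List.sorted scoville (fun v => v) false).length
      = (scoville.foldl (fun heap elem => heappush heap elem) []).length := by
    rw [hsp.length_eq, hperm.length_eq]
  rw [hlen]
  refine loop_eq (scoville.foldl (fun heap elem => heappush heap elem) []).length _ _ K 0
    le_rfl ?_ hinv (hperm.trans hsp.symm) ?_
  · intro hc
    rw [hc] at hperm
    exact hpre hperm.symm.eq_nil
  · simpa using PySem.List.sorted_pairwise scoville (fun v => v)
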